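-- pv_equiv track=rewrite | github.com/KhuongNguyenDinh/final-thesis | utils.py | list_of_keys_mongoDB
-- ===== SOURCE A (Python) =====
-- def flatten(lst):
--     list_final = []
--     for sublist in lst:
--         if isinstance(sublist,list):
--             for i in sublist:
--                 list_final.append(i)
--         else:
--             list_final.append(sublist)
--
--     return list_final
--
-- def list_of_keys_mongoDB(collection):
-- # type: list of list
-- # parameter: collection
--     key_lst = []
--     for x in collection:
--         count = key_lst.count(list(x.keys()))
--         if count == 0:
--             key_lst.append(list(x.keys()))
--         else:
--             continue
--     final = flatten(key_lst)
--     return final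
-- ===== SOURCE B (Python) =====
-- def list_of_keys_mongoDB(collection):
--     # Recursive forward-delete: emit the first document's keys, then recurse on
--     # the rest with every document sharing that key signature removed.
--     if not collection:
--         return []
--     head, rest = collection[0], collection[1:]
--     k = list(head.keys())
--     return k + list_of_keys_mongoDB([x for x in rest if list(x.keys()) != k])
-- ===== Notes on version B (the rewrite author's own statement) =====
-- stated objective: alternative
-- what changed: A scans a growing list of already-kept key-lists with list.count and flattens it in a second pass; B keeps no seen structure at all: it recursively emits the head document's keys and deletes all later documents with the same key signature before recursing.
import Mathlib
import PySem

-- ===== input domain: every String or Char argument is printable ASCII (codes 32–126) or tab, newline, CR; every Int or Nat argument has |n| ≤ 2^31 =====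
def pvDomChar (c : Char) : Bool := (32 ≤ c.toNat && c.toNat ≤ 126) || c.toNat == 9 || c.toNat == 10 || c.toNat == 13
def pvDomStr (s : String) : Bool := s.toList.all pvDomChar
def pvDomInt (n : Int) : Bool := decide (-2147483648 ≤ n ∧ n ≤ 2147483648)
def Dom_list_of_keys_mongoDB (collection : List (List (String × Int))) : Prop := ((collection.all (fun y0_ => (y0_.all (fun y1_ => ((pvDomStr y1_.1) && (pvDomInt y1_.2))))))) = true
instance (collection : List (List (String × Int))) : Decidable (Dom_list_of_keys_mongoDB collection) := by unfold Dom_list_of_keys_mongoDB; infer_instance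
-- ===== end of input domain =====

-- B replaces A's seen-list dedup + separate flatten by a filter-recursion that deletes later duplicates; alternative decomposition, not faster.


-- ===== PORT A =====
-- flatten: every element of key_lst is a list here, so the isinstance branch always takes the list arm.
def pvFlatten (lst : List (List String)) : List String :=
  lst.foldl (fun acc sub => sub.foldl (fun a i => a ++ [i]) acc) []

def list_of_keys_mongoDB (collection : List (List (String × Int))) : List String :=
  pvFlatten (collection.foldl (fun key_lst x =>
    let k := x.map Prod.fst        -- list(x.keys())
    if PySem.List.count key_lst k = 0 then key_lst ++ [k] else key_lst) [])

-- ===== PORT B =====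
def list_of_keys_mongoDB_alt (collection : List (List (String × Int))) : List String :=
  match collection with
  | [] => []
  | head :: rest =>
    let k := head.map Prod.fst     -- list(head.keys())
    k ++ list_of_keys_mongoDB_alt (rest.filter (fun x => x.map Prod.fst ≠ k))
termination_by collection.length
decreasing_by
  simp only [List.length_cons, List.length_unattach]
  exact Nat.lt_succ_of_le (le_trans (List.length_filter_le _ _) (by simp))

-- ===== PRECONDITION & SPEC =====
def Spec_list_of_keys_mongoDB (collection : List (List (String × Int))) (out : List String) : Prop := out = list_of_keys_mongoDB_alt collection
instance (collection : List (List (String × Int))) (out : List String) : Decidable (Spec_list_of_keys_mongoDB collection out) := by unfold Spec_list_of_keys_mongoDB; infer_instance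

-- ===== CLAIM (what is proved, stated in full; the proofs are below) =====
def Claim_equal_list_of_keys_mongoDB : Prop := ∀ (collection : List (List (String × Int))), Dom_list_of_keys_mongoDB collection → Spec_list_of_keys_mongoDB collection (list_of_keys_mongoDB collection)

-- ===== LEMMAS AND PROOFS =====

-- ===== VERDICT (by name: the statement is the Claim_ definition above) =====
-- filter-recursion dedup on key lists (mirrors B's recursion, on the key lists alone)
def pvG : List (List String) → List (List String)
  | [] => []
  | k :: t => k :: pvG (t.filter (fun x => x ≠ k))
termination_by ks => ks.length
decreasing_by
  simp only [List.length_cons, List.length_unattach]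
  exact Nat.lt_succ_of_le (le_trans (List.length_filter_le _ _) (by simp))

theorem pvG_cons (k : List String) (t : List (List String)) :
    pvG (k :: t) = k :: pvG (t.filter (fun x => x ≠ k)) := by
  rw [pvG.eq_def]

theorem pvFlatten_eq (lst : List (List String)) : pvFlatten lst = lst.flatten := by
  unfold pvFlatten
  suffices h : ∀ (l : List (List String)) (acc : List String),
      l.foldl (fun acc sub => sub.foldl (fun a i => a ++ [i]) acc) acc = acc ++ l.flatten by
    simpa using h lst []
  intro l
  induction l with
  | nil => simp
  | cons s t ih =>
    intro acc
    rw [List.foldl_cons, PySem.List.foldl_append_singleton, ih]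
    simp

-- A's fold-with-count dedup equals the filter-recursion dedup past any accumulator.
theorem foldDedup_eq_pvG (coll : List (List (String × Int))) :
    ∀ (acc : List (List String)),
      coll.foldl (fun key_lst x =>
        let k := x.map Prod.fst
        if PySem.List.count key_lst k = 0 then key_lst ++ [k] else key_lst) acc
      = acc ++ pvG ((coll.map (fun x => x.map Prod.fst)).filter (fun k => k ∉ acc)) := by
  induction coll with
  | nil => intro acc; simp [pvG]
  | cons x t ih =>
    intro acc
    simp only [List.foldl_cons, List.map_cons, List.filter_cons]
    by_cases h : (x.map Prod.fst) ∈ acc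
    · have hn : ¬ PySem.List.count acc (x.map Prod.fst) = 0 := by
        simp [PySem.List.count_eq, List.count_eq_zero, h]
      simp only [if_neg hn, h]
      simpa using ih acc
    · have hz : PySem.List.count acc (x.map Prod.fst) = 0 := by
        simp [PySem.List.count_eq, List.count_eq_zero]; exact h
      simp only [if_pos hz]
      rw [ih (acc ++ [x.map Prod.fst])]
      have hfil : (t.map (fun x => x.map Prod.fst)).filter
            (fun k => decide (k ∉ acc ++ [x.map Prod.fst]))
          = ((t.map (fun x => x.map Prod.fst)).filter (fun k => decide (k ∉ acc))).filter
              (fun k => decide (k ≠ x.map Prod.fst)) := by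
        rw [List.filter_filter]
        apply List.filter_congr
        intro y _
        simp only [List.mem_append, List.mem_singleton, not_or, Bool.decide_and, decide_not]
        rw [Bool.and_comm]
      have hmem : decide ((x.map Prod.fst) ∉ acc) = true := by simpa using h
      rw [hmem, hfil]
      simp [pvG_cons]

-- B equals the flatten of the filter-recursion dedup of the key lists.
theorem alt_eq_flatten_pvG :
    ∀ (n : Nat) (collection : List (List (String × Int))), collection.length ≤ n →
      list_of_keys_mongoDB_alt collection
        = (pvG (collection.map (fun x => x.map Prod.fst))).flatten := by
  intro n
  induction n with
  | zero =>
    intro collection h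
    have : collection = [] := List.eq_nil_of_length_eq_zero (Nat.le_zero.mp h)
    subst this
    simp [list_of_keys_mongoDB_alt, pvG]
  | succ n ih =>
    intro collection h
    match collection with
    | [] => simp [list_of_keys_mongoDB_alt, pvG]
    | head :: rest =>
      rw [list_of_keys_mongoDB_alt, List.map_cons, pvG_cons]
      simp only [List.flatten_cons]
      have hlen : (rest.filter (fun x => decide (x.map Prod.fst ≠ head.map Prod.fst))).length ≤ n := by
        have := List.length_filter_le (fun x => decide (x.map Prod.fst ≠ head.map Prod.fst)) rest
        simp only [List.length_cons, Nat.succ_le_succ_iff] at h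
        omega
      rw [ih _ hlen]
      congr 2
      rw [List.filter_map]
      rfl

-- ===== VERDICT (by name: the statement is the Claim_ definition above) =====
theorem list_of_keys_mongoDB_spec : Claim_equal_list_of_keys_mongoDB := by
  intro collection _
  unfold Spec_list_of_keys_mongoDB list_of_keys_mongoDB
  rw [pvFlatten_eq, foldDedup_eq_pvG, alt_eq_flatten_pvG collection.length collection (le_refl _)]
  simp
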